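-- pv_equiv track=rewrite | github.com/Prasun-Adhikari/image-processing | ip_lab/splitmerge.py | split_region
-- ===== SOURCE A (Python) =====
-- def split_region(region):
--     coords, bounds = region
--     x1, y1, x2, y2 = bounds
--     xm, ym = (x2 + x1)//2, (y2 + y1)//2
--     subcoords = [set() for _ in range(4)]
--     for x, y in coords:
--         subcoords[2*(x >= xm) + (y >= ym)].add((x, y))
--     return [(subcoords[0], (x1, y1, xm, ym)),
--             (subcoords[1], (x1, ym, xm, y2)),
--             (subcoords[2], (xm, y1, x2, ym)),
--             (subcoords[3], (xm, ym, x2, y2))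
--            ]
-- ===== SOURCE B (Python) =====
-- def split_region(region):
--     coords, bounds = region
--     x1, y1, x2, y2 = bounds
--     xm, ym = (x2 + x1)//2, (y2 + y1)//2
--     return [({(x, y) for x, y in coords if x < xm and y < ym}, (x1, y1, xm, ym)),
--             ({(x, y) for x, y in coords if x < xm and y >= ym}, (x1, ym, xm, y2)),
--             ({(x, y) for x, y in coords if x >= xm and y < ym}, (xm, y1, x2, ym)),
--             ({(x, y) for x, y in coords if x >= xm and y >= ym}, (xm, ym, x2, y2))]
-- ===== Notes on version B (the rewrite author's own statement) =====
-- stated objective: simpler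
-- what changed: One loop bucketing into a list of four sets indexed by 2*(x>=xm)+(y>=ym) is replaced by four independent filtered set-comprehensions over coords, one per quadrant; no mutable bucket list or computed index remains.
import Mathlib
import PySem

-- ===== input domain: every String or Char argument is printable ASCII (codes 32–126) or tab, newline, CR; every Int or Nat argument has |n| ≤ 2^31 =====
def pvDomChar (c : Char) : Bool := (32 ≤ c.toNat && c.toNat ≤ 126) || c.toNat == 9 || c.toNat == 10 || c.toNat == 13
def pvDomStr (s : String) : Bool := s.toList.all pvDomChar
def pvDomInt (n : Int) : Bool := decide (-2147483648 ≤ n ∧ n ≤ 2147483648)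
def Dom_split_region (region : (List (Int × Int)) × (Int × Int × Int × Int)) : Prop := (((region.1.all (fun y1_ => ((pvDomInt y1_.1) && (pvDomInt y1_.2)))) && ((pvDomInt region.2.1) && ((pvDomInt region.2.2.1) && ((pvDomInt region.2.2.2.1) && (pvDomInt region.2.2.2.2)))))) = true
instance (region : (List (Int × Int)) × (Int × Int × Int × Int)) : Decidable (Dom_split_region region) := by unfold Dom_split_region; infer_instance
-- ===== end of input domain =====

-- B replaces A's single bucketing loop over a mutable list of four sets by four
-- independent filtered set-comprehensions, one per quadrant (simpler decomposition).

-- ===== PORT A =====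
-- the loop body: subcoords[2*(x >= xm) + (y >= ym)].add((x, y))
def splitStep (xm ym : Int) (subs : List (PySem.Set (Int × Int))) (c : Int × Int) :
    List (PySem.Set (Int × Int)) :=
  let i : Int := 2 * (if c.1 ≥ xm then 1 else 0) + (if c.2 ≥ ym then 1 else 0)
  PySem.List.pySetD subs i (PySem.Set.add (PySem.List.pyGetD subs i PySem.Set.empty) c)

def split_region (region : (List (Int × Int)) × (Int × Int × Int × Int)) :
    List ((List (Int × Int)) × (Int × Int × Int × Int)) :=
  let coords := region.1
  let x1 := region.2.1; let y1 := region.2.2.1; let x2 := region.2.2.2.1; let y2 := region.2.2.2.2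
  let xm := PySem.Int.floordiv (x2 + x1) 2
  let ym := PySem.Int.floordiv (y2 + y1) 2
  let subcoords : List (PySem.Set (Int × Int)) :=
    coords.foldl (splitStep xm ym) [PySem.Set.empty, PySem.Set.empty, PySem.Set.empty, PySem.Set.empty]
  [(PySem.List.pyGetD subcoords 0 PySem.Set.empty, (x1, y1, xm, ym)),
   (PySem.List.pyGetD subcoords 1 PySem.Set.empty, (x1, ym, xm, y2)),
   (PySem.List.pyGetD subcoords 2 PySem.Set.empty, (xm, y1, x2, ym)),
   (PySem.List.pyGetD subcoords 3 PySem.Set.empty, (xm, ym, x2, y2))]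

-- ===== PORT B =====
def split_region_alt (region : (List (Int × Int)) × (Int × Int × Int × Int)) :
    List ((List (Int × Int)) × (Int × Int × Int × Int)) :=
  let coords := region.1
  let x1 := region.2.1; let y1 := region.2.2.1; let x2 := region.2.2.2.1; let y2 := region.2.2.2.2
  let xm := PySem.Int.floordiv (x2 + x1) 2
  let ym := PySem.Int.floordiv (y2 + y1) 2
  [(PySem.Set.ofList (coords.filter (fun c => c.1 < xm && c.2 < ym)), (x1, y1, xm, ym)),
   (PySem.Set.ofList (coords.filter (fun c => c.1 < xm && c.2 ≥ ym)), (x1, ym, xm, y2)),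
   (PySem.Set.ofList (coords.filter (fun c => c.1 ≥ xm && c.2 < ym)), (xm, y1, x2, ym)),
   (PySem.Set.ofList (coords.filter (fun c => c.1 ≥ xm && c.2 ≥ ym)), (xm, ym, x2, y2))]

-- ===== PRECONDITION & SPEC =====
def Spec_split_region (region : (List (Int × Int)) × (Int × Int × Int × Int)) (out : List ((List (Int × Int)) × (Int × Int × Int × Int))) : Prop := out = split_region_alt region
instance (region : (List (Int × Int)) × (Int × Int × Int × Int)) (out : List ((List (Int × Int)) × (Int × Int × Int × Int))) : Decidable (Spec_split_region region out) := by unfold Spec_split_region; infer_instance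

-- ===== CLAIM (what is proved, stated in full; the proofs are below) =====
def Claim_equal_split_region : Prop := ∀ (region : (List (Int × Int)) × (Int × Int × Int × Int)), Dom_split_region region → Spec_split_region region (split_region region)

-- ===== LEMMAS AND PROOFS =====

-- each bucket of the loop is an independent fold of Set.add over the filtered coords
theorem split_loop_eq (xm ym : Int) (coords : List (Int × Int))
    (s0 s1 s2 s3 : PySem.Set (Int × Int)) :
    coords.foldl (splitStep xm ym) [s0, s1, s2, s3] =
      [(coords.filter (fun c => c.1 < xm && c.2 < ym)).foldl PySem.Set.add s0,
       (coords.filter (fun c => c.1 < xm && c.2 ≥ ym)).foldl PySem.Set.add s1,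
       (coords.filter (fun c => c.1 ≥ xm && c.2 < ym)).foldl PySem.Set.add s2,
       (coords.filter (fun c => c.1 ≥ xm && c.2 ≥ ym)).foldl PySem.Set.add s3] := by
  induction coords generalizing s0 s1 s2 s3 with
  | nil => rfl
  | cons c cs ih =>
    by_cases hx : xm ≤ c.1 <;> by_cases hy : ym ≤ c.2
    · simp [splitStep, hx, hy, not_lt.mpr hx, not_lt.mpr hy,
        PySem.List.pySetD, PySem.List.pySet?, PySem.List.pyIdx?, PySem.List.pyGetD,
        PySem.List.pyGet?, ih]
    · simp [splitStep, hx, hy, not_lt.mpr hx, not_le.mp hy,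
        PySem.List.pySetD, PySem.List.pySet?, PySem.List.pyIdx?, PySem.List.pyGetD,
        PySem.List.pyGet?, ih]
    · simp [splitStep, hx, hy, not_le.mp hx, not_lt.mpr hy,
        PySem.List.pySetD, PySem.List.pySet?, PySem.List.pyIdx?, PySem.List.pyGetD,
        PySem.List.pyGet?, ih]
    · simp [splitStep, hx, hy, not_le.mp hx, not_le.mp hy,
        PySem.List.pySetD, PySem.List.pySet?, PySem.List.pyIdx?, PySem.List.pyGetD,
        PySem.List.pyGet?, ih]

-- ===== VERDICT (by name: the statement is the Claim_ definition above) =====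
theorem split_region_spec : Claim_equal_split_region := by
  intro region _
  unfold Spec_split_region split_region split_region_alt
  simp only [split_loop_eq]
  rfl
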